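-- pv_equiv track=rewrite | github.com/yiyousiow000814/XAUUSD-Calendar-Agent | scripts/news/news_fetcher.py | _normalize_host
-- ===== SOURCE A (Python) =====
-- def _normalize_host(host: str) -> str:
--     host = (host or "").strip().lower()
--     prefixes = ("www.", "amp.", "m.", "mobile.")
--     while True:
--         matched = False
--         for prefix in prefixes:
--             if host.startswith(prefix):
--                 host = host[len(prefix) :]
--                 matched = True
--                 break
--         if not matched:
--             break
--     return host
-- ===== SOURCE B (Python) =====
-- def _normalize_host(host: str) -> str:
--     host = (host or "").strip().lower()
--     labels = host.split(".")
--     i = 0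
--     while i < len(labels) - 1 and labels[i] in ("www", "amp", "m", "mobile"):
--         i += 1
--     return ".".join(labels[i:])
-- ===== Notes on version B (the rewrite author's own statement) =====
-- stated objective: alternative
-- what changed: Replaces the restart-the-scan while/for prefix-stripping loop (repeated startswith + slicing) with a split-on-dot pass: split the host into labels once, advance an index past leading labels in {www, amp, m, mobile} while a later label remains, and rejoin.
import Mathlib
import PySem

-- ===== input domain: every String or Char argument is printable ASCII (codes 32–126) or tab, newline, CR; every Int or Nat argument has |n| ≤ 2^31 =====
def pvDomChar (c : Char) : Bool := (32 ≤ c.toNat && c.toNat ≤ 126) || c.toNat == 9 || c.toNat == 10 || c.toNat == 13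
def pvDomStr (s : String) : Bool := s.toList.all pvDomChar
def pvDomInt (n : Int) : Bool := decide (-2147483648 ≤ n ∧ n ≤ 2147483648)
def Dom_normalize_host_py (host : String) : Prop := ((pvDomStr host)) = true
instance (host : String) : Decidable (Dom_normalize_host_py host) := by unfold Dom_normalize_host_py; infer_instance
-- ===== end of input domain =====

-- B replaces A's restart-the-scan prefix-stripping loop by one split-on-dot pass
-- (split into labels, skip leading known labels while a later label remains, rejoin): an alternative algorithm.


-- ===== PORT A =====
-- prefixes = ("www.", "amp.", "m.", "mobile.")
def pvPrefixes : List (List Char) := ["www.".toList, "amp.".toList, "m.".toList, "mobile.".toList]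

-- the inner 'for prefix in prefixes: if host.startswith(prefix): … break' — returns the first matching prefix
def pvFindPrefix : List (List Char) → List Char → Option (List Char)
  | [], _ => none
  | p :: ps, h => if PySem.Chars.startswith h p then some p else pvFindPrefix ps h

theorem pvFindPrefix_some {ps : List (List Char)} {h p : List Char}
    (hf : pvFindPrefix ps h = some p) : p ∈ ps ∧ p <+: h := by
  induction ps with
  | nil => simp [pvFindPrefix] at hf
  | cons q qs ih =>
    by_cases hq : PySem.Chars.startswith h q = true
    · simp [pvFindPrefix, hq] at hf
      subst hf
      exact ⟨List.mem_cons_self, (PySem.Chars.startswith_iff h q).mp hq⟩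
    · simp [pvFindPrefix, hq] at hf
      obtain ⟨hm, hp⟩ := ih hf
      exact ⟨List.mem_cons_of_mem _ hm, hp⟩

theorem pvPrefixes_pos : ∀ p ∈ pvPrefixes, 0 < p.length := by decide

-- 'while True: … host = host[len(prefix):] …'; the slice index len(prefix) is nonnegative, so it is List.drop
def pvLoopA (h : List Char) : List Char :=
  match hf : pvFindPrefix pvPrefixes h with
  | some p => pvLoopA (h.drop p.length)
  | none => h
termination_by h.length
decreasing_by
  obtain ⟨hm, hpre⟩ := pvFindPrefix_some hf
  have h1 := pvPrefixes_pos p hm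
  have h2 := hpre.length_le
  simp only [List.length_drop]
  omega

def normalize_host_py (host : String) : String :=
  -- host = (host or "").strip().lower()
  String.mk (pvLoopA (PySem.Chars.lower (PySem.Chars.strip (if host = "" then "" else host).toList)))

-- ===== PORT B =====
def pvLabels : List (List Char) := ["www".toList, "amp".toList, "m".toList, "mobile".toList]

-- 'while i < len(labels) - 1 and labels[i] in (…): i += 1' then 'labels[i:]', as structural recursion on the label list
def pvDropLabels : List (List Char) → List (List Char)
  | l :: r :: rs => if l ∈ pvLabels then pvDropLabels (r :: rs) else l :: r :: rs
  | ls => ls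

def normalize_host_py_alt (host : String) : String :=
  -- host = (host or "").strip().lower()
  let h := PySem.Chars.lower (PySem.Chars.strip (if host = "" then "" else host).toList)
  -- '.'.join(labels[i:]) over labels = host.split(".")
  String.mk (PySem.Chars.join ['.'] (pvDropLabels (PySem.Chars.splitOn h ['.'])))

-- ===== PRECONDITION & SPEC =====
def Spec_normalize_host_py (host : String) (out : String) : Prop := out = normalize_host_py_alt host
instance (host : String) (out : String) : Decidable (Spec_normalize_host_py host out) := by unfold Spec_normalize_host_py; infer_instance

-- ===== CLAIM (what is proved, stated in full; the proofs are below) =====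
def Claim_equal_normalize_host_py : Prop := ∀ (host : String), Dom_normalize_host_py host → Spec_normalize_host_py host (normalize_host_py host)

-- ===== LEMMAS AND PROOFS =====

-- structural single-char split on '.', used only in the proofs
def pvSp : List Char → List (List Char)
  | [] => [[]]
  | c :: rest => if c = '.' then [] :: pvSp rest else (pvSp rest).modifyHead (c :: ·)

theorem pvSp_ne_nil (cs : List Char) : pvSp cs ≠ [] := by
  cases cs with
  | nil => simp [pvSp]
  | cons c rest =>
    simp only [pvSp]
    split
    · simp
    · intro h
      have := congrArg List.length h
      simp at this
      exact (pvSp_ne_nil rest) this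

theorem pvGo_eq (l : List Char) : ∀ (fuel : Nat) (cur : List Char) (acc : List (List Char)),
    l.length < fuel →
    PySem.Chars.splitOn.go ['.'] fuel l cur acc = acc.reverse ++ (pvSp l).modifyHead (cur.reverse ++ ·) := by
  induction l with
  | nil =>
    intro fuel cur acc hf
    cases fuel with
    | zero => omega
    | succ f => simp [PySem.Chars.splitOn.go, pvSp]
  | cons c rest ih =>
    intro fuel cur acc hf
    cases fuel with
    | zero => simp at hf
    | succ f =>
      rw [PySem.Chars.splitOn.go]
      by_cases hc : c = '.'
      · subst hc
        have hpre : List.isPrefixOf ['.'] ('.' :: rest) = true := by simp [List.isPrefixOf]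
        rw [if_pos hpre]
        have hd : List.drop (['.'] : List Char).length ('.' :: rest) = rest := rfl
        rw [hd, ih f [] (cur.reverse :: acc) (by simpa using hf)]
        have hsp' : pvSp ('.' :: rest) = [] :: pvSp rest := by simp [pvSp]
        rw [hsp']
        cases pvSp rest <;> simp [List.modifyHead]
      · have hpre : List.isPrefixOf ['.'] (c :: rest) = false := by
          simp [List.isPrefixOf]; exact fun h => (hc h.symm).elim
        rw [if_neg (by simp [hpre])]
        rw [ih f (c :: cur) acc (by simpa using hf)]
        obtain ⟨h, t, hht⟩ : ∃ h t, pvSp rest = h :: t := by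
          cases hsp : pvSp rest with
          | nil => exact absurd hsp (pvSp_ne_nil rest)
          | cons h t => exact ⟨h, t, rfl⟩
        simp [pvSp, hc, hht, List.modifyHead]

theorem pvSplitOn_eq (cs : List Char) : PySem.Chars.splitOn cs ['.'] = pvSp cs := by
  unfold PySem.Chars.splitOn
  rw [pvGo_eq cs (cs.length + 1) [] [] (by omega)]
  obtain ⟨h, t, hht⟩ : ∃ h t, pvSp cs = h :: t := by
    cases hsp : pvSp cs with
    | nil => exact absurd hsp (pvSp_ne_nil cs)
    | cons h t => exact ⟨h, t, rfl⟩
  simp [hht, List.modifyHead]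

theorem pvJoin_cons (c : Char) (h : List Char) (t : List (List Char)) :
    PySem.Chars.join ['.'] ((c :: h) :: t) = c :: PySem.Chars.join ['.'] (h :: t) := by
  cases t with
  | nil => simp [PySem.Chars.join_singleton]
  | cons b t' => rw [PySem.Chars.join_cons_cons, PySem.Chars.join_cons_cons]; simp

theorem pvJoin_sp (cs : List Char) : PySem.Chars.join ['.'] (pvSp cs) = cs := by
  induction cs with
  | nil => simp [pvSp, PySem.Chars.join_singleton]
  | cons c rest ih =>
    by_cases hc : c = '.'
    · subst hc
      have hsp' : pvSp ('.' :: rest) = [] :: pvSp rest := by simp [pvSp]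
      rw [hsp']
      obtain ⟨h, t, hht⟩ : ∃ h t, pvSp rest = h :: t := by
        cases hsp : pvSp rest with
        | nil => exact absurd hsp (pvSp_ne_nil rest)
        | cons h t => exact ⟨h, t, rfl⟩
      rw [hht, PySem.Chars.join_cons_cons]
      rw [hht] at ih
      simp [ih]
    · simp only [pvSp, if_neg hc]
      obtain ⟨h, t, hht⟩ : ∃ h t, pvSp rest = h :: t := by
        cases hsp : pvSp rest with
        | nil => exact absurd hsp (pvSp_ne_nil rest)
        | cons h t => exact ⟨h, t, rfl⟩
      rw [hht, List.modifyHead, pvJoin_cons]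
      rw [hht] at ih
      rw [ih]

theorem pvSp_label (lab : List Char) (t : List Char) (hl : '.' ∉ lab) :
    pvSp (lab ++ '.' :: t) = lab :: pvSp t := by
  induction lab with
  | nil => simp [pvSp]
  | cons c l ih =>
    have hc : c ≠ '.' := fun h => hl (h ▸ List.mem_cons_self)
    simp only [List.cons_append, pvSp, if_neg hc]
    rw [ih (fun h => hl (List.mem_cons_of_mem _ h))]
    simp [List.modifyHead]

theorem pvFindPrefix_none {ps : List (List Char)} {h : List Char}
    (hf : pvFindPrefix ps h = none) : ∀ p ∈ ps, ¬ p <+: h := by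
  induction ps with
  | nil => simp
  | cons q qs ih =>
    by_cases hq : PySem.Chars.startswith h q = true
    · simp [pvFindPrefix, hq] at hf
    · simp [pvFindPrefix, hq] at hf
      intro p hp
      rcases List.mem_cons.mp hp with rfl | hp'
      · exact fun hpre => hq ((PySem.Chars.startswith_iff h p).mpr hpre)
      · exact ih hf p hp'

theorem pvLoopA_none {h : List Char} (hn : pvFindPrefix pvPrefixes h = none) :
    pvLoopA h = h := by
  rw [pvLoopA]
  split
  · rename_i p hp; rw [hn] at hp; exact absurd hp (by simp)
  · rfl

theorem pvLoopA_some {h p : List Char} (hs : pvFindPrefix pvPrefixes h = some p) :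
    pvLoopA h = pvLoopA (h.drop p.length) := by
  rw [pvLoopA]
  split
  · rename_i q hq; rw [hs] at hq; cases hq; rfl
  · rename_i hq; rw [hs] at hq; exact absurd hq (by simp)

theorem pvMain : ∀ (n : Nat) (cs : List Char), cs.length ≤ n →
    PySem.Chars.join ['.'] (pvDropLabels (PySem.Chars.splitOn cs ['.'])) = pvLoopA cs := by
  intro n
  induction n with
  | zero =>
    intro cs hlen
    have : cs = [] := List.length_eq_zero_iff.mp (Nat.le_zero.mp hlen)
    subst this
    rw [pvLoopA_none (by decide)]
    decide
  | succ n ih =>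
    intro cs hlen
    rw [pvSplitOn_eq]
    cases hfp : pvFindPrefix pvPrefixes cs with
    | none =>
      rw [pvLoopA_none hfp]
      have hno := pvFindPrefix_none hfp
      obtain ⟨l, rest, hlr⟩ : ∃ l rest, pvSp cs = l :: rest := by
        cases hsp : pvSp cs with
        | nil => exact absurd hsp (pvSp_ne_nil cs)
        | cons l rest => exact ⟨l, rest, rfl⟩
      rw [hlr]
      cases rest with
      | nil =>
        have := pvJoin_sp cs
        rw [hlr] at this
        simpa [pvDropLabels] using this
      | cons r rs =>
        have hrt : PySem.Chars.join ['.'] (l :: r :: rs) = cs := by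
          have := pvJoin_sp cs; rw [hlr] at this; exact this
        have hnl : l ∉ pvLabels := by
          intro hmem
          have hcs : cs = l ++ '.' :: PySem.Chars.join ['.'] (r :: rs) := by
            rw [← hrt, PySem.Chars.join_cons_cons]; simp
          have hppre : (l ++ ['.']) <+: cs := by
            rw [hcs]
            exact ⟨PySem.Chars.join ['.'] (r :: rs), by simp⟩
          have hpmem : (l ++ ['.']) ∈ pvPrefixes := by
            simp only [pvLabels, List.mem_cons] at hmem
            rcases hmem with rfl | rfl | rfl | (rfl | hx) <;> first | decide | simp at hx
          exact hno _ hpmem hppre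
        rw [pvDropLabels, if_neg hnl, hrt]
    | some p =>
      obtain ⟨hm, hpre⟩ := pvFindPrefix_some hfp
      obtain ⟨lab, hlabm, hpeq, hdot⟩ :
          ∃ lab, lab ∈ pvLabels ∧ p = lab ++ ['.'] ∧ '.' ∉ lab := by
        simp only [pvPrefixes, List.mem_cons] at hm
        rcases hm with rfl | rfl | rfl | (rfl | hx)
        case inr.inr.inr.inr => simp at hx
        · exact ⟨"www".toList, by decide, by decide, by decide⟩
        · exact ⟨"amp".toList, by decide, by decide, by decide⟩
        · exact ⟨"m".toList, by decide, by decide, by decide⟩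
        · exact ⟨"mobile".toList, by decide, by decide, by decide⟩
      obtain ⟨t, hts⟩ := hpre
      have hcs : cs = lab ++ '.' :: t := by rw [← hts, hpeq]; simp
      have hdrop : cs.drop p.length = t := by rw [← hts]; simp
      have hlt : t.length ≤ n := by
        have h2 : 0 < p.length := pvPrefixes_pos p hm
        have := congrArg List.length hts
        simp at this
        omega
      rw [pvLoopA_some hfp, hdrop, hcs, pvSp_label lab t hdot]
      obtain ⟨h, ts, hht⟩ : ∃ h ts, pvSp t = h :: ts := by
        cases hsp : pvSp t with
        | nil => exact absurd hsp (pvSp_ne_nil t)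
        | cons h ts => exact ⟨h, ts, rfl⟩
      rw [hht, pvDropLabels, if_pos hlabm, ← hht]
      have := ih t hlt
      rw [pvSplitOn_eq] at this
      exact this

-- ===== VERDICT (by name: the statement is the Claim_ definition above) =====
theorem normalize_host_py_spec : Claim_equal_normalize_host_py := by
  intro host _
  unfold Spec_normalize_host_py normalize_host_py normalize_host_py_alt
  exact congrArg String.mk
    (pvMain _ _ (Nat.le_refl _)).symm
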